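-- pv_equiv track=rewrite | github.com/Darthron/University | Numerical List/Utility/utility.py | stringIsNumericUntilSpaceOrEnd
-- ===== SOURCE A (Python) =====
-- def stringIsNumericUntilSpaceOrEnd(str) :
--     #Input : string
--     #Preconditions : -
--     #Output : True if str has only digits until its first space character or string ends
--     #         False otherwise
--     #Postconditions :
--
--     if (not str[0].isnumeric()) :
--         return False
--     for c in str :
--         if (c < '0' or c > '9') :
--             if (c == ' ') :
--                 return True
--             return False
--     return True
-- ===== SOURCE B (Python) =====
-- def stringIsNumericUntilSpaceOrEnd(str):
--     if not str[0].isnumeric():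
--         return False
--     i = str.find(' ')
--     prefix = str if i < 0 else str[:i]
--     return all('0' <= c <= '9' for c in prefix)
-- ===== Notes on version B (the rewrite author's own statement) =====
-- stated objective: simpler
-- what changed: Replaces the char-by-char scan with early returns on space/non-digit by computing the space boundary first (str.find) and validating the whole prefix with one all() over the slice.
import Mathlib
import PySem

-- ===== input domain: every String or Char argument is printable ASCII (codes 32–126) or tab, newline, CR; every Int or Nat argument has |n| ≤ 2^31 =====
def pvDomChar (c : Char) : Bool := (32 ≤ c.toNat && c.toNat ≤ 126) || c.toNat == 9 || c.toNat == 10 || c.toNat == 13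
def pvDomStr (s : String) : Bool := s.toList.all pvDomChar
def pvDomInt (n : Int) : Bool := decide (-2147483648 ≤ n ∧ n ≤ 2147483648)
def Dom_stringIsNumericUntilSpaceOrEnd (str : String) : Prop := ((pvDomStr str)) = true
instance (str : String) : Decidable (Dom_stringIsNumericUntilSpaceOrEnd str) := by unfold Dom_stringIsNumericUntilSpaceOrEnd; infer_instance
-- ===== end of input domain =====

-- B computes the space boundary first (str.find) and checks the whole prefix with one all(),
-- instead of A's char-by-char scan with early returns on space/non-digit; same cost, simpler decomposition.


-- c.isnumeric(): on the printable-ASCII domain Dom this is exactly the digit test '0' ≤ c ≤ '9'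
def pvIsNumericChar (c : Char) : Bool := decide ('0' ≤ c) && decide (c ≤ '9')

-- ===== PORT A =====
-- the 'for c in str' loop: at the first non-digit character return (c == ' '), else keep scanning
def pvLoopA : List Char → Bool
  | [] => true
  | c :: rest =>
    if c < '0' ∨ '9' < c then (c == ' ') else pvLoopA rest

def stringIsNumericUntilSpaceOrEnd (str : String) : Bool :=
  match PySem.List.pyGet? str.toList 0 with
  | none => false   -- str[0] raises IndexError on ""; excluded by Pre_
  | some c0 =>
    if ¬ (pvIsNumericChar c0 = true) then false
    else pvLoopA str.toList

-- ===== PORT B =====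
def stringIsNumericUntilSpaceOrEnd_alt (str : String) : Bool :=
  match PySem.List.pyGet? str.toList 0 with
  | none => false   -- str[0] raises IndexError on ""; excluded by Pre_
  | some c0 =>
    if ¬ (pvIsNumericChar c0 = true) then false
    else
      let i := PySem.Str.find str " "
      let pfx := if i < 0 then str.toList else PySem.List.slice str.toList none (some i)
      pfx.all (fun c => decide ('0' ≤ c) && decide (c ≤ '9'))

-- ===== PRECONDITION & SPEC =====
-- A evaluates str[0], which raises IndexError on the empty string; Pre_ excludes exactly that.
def Pre_stringIsNumericUntilSpaceOrEnd (str : String) : Prop := str ≠ ""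
instance (str : String) : Decidable (Pre_stringIsNumericUntilSpaceOrEnd str) := by unfold Pre_stringIsNumericUntilSpaceOrEnd; infer_instance
def pvWitness_stringIsNumericUntilSpaceOrEnd : String := "12 x"

def Spec_stringIsNumericUntilSpaceOrEnd (str : String) (out : Bool) : Prop := out = stringIsNumericUntilSpaceOrEnd_alt str
instance (str : String) (out : Bool) : Decidable (Spec_stringIsNumericUntilSpaceOrEnd str out) := by unfold Spec_stringIsNumericUntilSpaceOrEnd; infer_instance

-- ===== CLAIM (what is proved, stated in full; the proofs are below) =====
def Claim_equal_stringIsNumericUntilSpaceOrEnd : Prop := ∀ (str : String), Dom_stringIsNumericUntilSpaceOrEnd str → Pre_stringIsNumericUntilSpaceOrEnd str → Spec_stringIsNumericUntilSpaceOrEnd str (stringIsNumericUntilSpaceOrEnd str)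

-- ===== LEMMAS AND PROOFS =====

-- A's scan equals 'all digits in the prefix before the first space'
theorem pvLoopA_eq_takeWhile (cs : List Char) :
    pvLoopA cs = (cs.takeWhile (fun c => !(c == ' '))).all (fun c => decide ('0' ≤ c) && decide (c ≤ '9')) := by
  induction cs with
  | nil => rfl
  | cons c rest ih =>
    by_cases hnd : c < '0' ∨ '9' < c
    · have hdig : (decide ('0' ≤ c) && decide (c ≤ '9')) = false := by
        rcases hnd with h | h
        · simp [not_le.mpr h]
        · simp [not_le.mpr h]
      by_cases hsp : c = ' '
      · subst hsp; simp [pvLoopA, hnd]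
      · simp [pvLoopA, hnd, hsp, hdig]
    · obtain ⟨h1, h2⟩ := not_or.mp hnd
      have hle1 : '0' ≤ c := not_lt.mp h1
      have hle2 : c ≤ '9' := not_lt.mp h2
      have hsp : ¬ c = ' ' := by intro h; subst h; exact absurd hle1 (by decide)
      simp [pvLoopA, hnd, hsp, hle1, hle2, ih]

-- B's prefix (find then slice) IS the takeWhile prefix
theorem pvFind_go_space (cs : List Char) (k : Nat) :
    PySem.Chars.find.go [' '] cs k =
      if ' ' ∈ cs then ((k + (cs.takeWhile (fun c => !(c == ' '))).length : Nat) : Int) else -1 := by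
  induction cs generalizing k with
  | nil => simp [PySem.Chars.find.go]
  | cons c rest ih =>
    by_cases hc : c = ' '
    · subst hc
      simp [PySem.Chars.find.go, List.isPrefixOf]
    · have hpre : List.isPrefixOf [' '] (c :: rest) = false := by
        simp [List.isPrefixOf]; exact fun h => hc h.symm
      have hctk : (!(c == ' ')) = true := by simp [hc]
      simp only [PySem.Chars.find.go, hpre, Bool.false_eq_true, if_false, ih,
        List.mem_cons, List.takeWhile_cons, hctk, if_pos rfl]
      by_cases hm : ' ' ∈ rest
      · simp [hm, eq_comm, hc]
        push_cast; ring
      · simp [hm, eq_comm, hc]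

theorem pvPrefix_eq_takeWhile (cs : List Char) :
    (if PySem.Chars.find cs [' '] < 0 then cs
     else PySem.List.slice cs none (some (PySem.Chars.find cs [' ']))) =
      cs.takeWhile (fun c => !(c == ' ')) := by
  have hgo := pvFind_go_space cs 0
  have hfind : PySem.Chars.find cs [' '] = PySem.Chars.find.go [' '] cs 0 := rfl
  by_cases hm : ' ' ∈ cs
  · have hlt : ¬ PySem.Chars.find cs [' '] < 0 := by
      rw [hfind, hgo]; simp [hm]
    rw [if_neg hlt, hfind, hgo, if_pos hm]
    have : ((0 + (cs.takeWhile (fun c => !(c == ' '))).length : Nat) : Int)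
        = ((cs.takeWhile (fun c => !(c == ' '))).length : Int) := by push_cast; ring
    rw [this, PySem.List.slice_to_natCast]
    exact (List.prefix_iff_eq_take.mp (List.takeWhile_prefix _)).symm
  · have hlt : PySem.Chars.find cs [' '] < 0 := by
      rw [hfind, hgo]; simp [hm]
    rw [if_pos hlt]
    symm
    exact List.takeWhile_eq_self_iff.mpr (fun c hcm => by
      have : c ≠ ' ' := fun h => hm (h ▸ hcm)
      simp [this])

-- ===== VERDICT (by name: the statement is the Claim_ definition above) =====
theorem stringIsNumericUntilSpaceOrEnd_spec : Claim_equal_stringIsNumericUntilSpaceOrEnd := by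
  intro str _ _
  unfold Spec_stringIsNumericUntilSpaceOrEnd stringIsNumericUntilSpaceOrEnd stringIsNumericUntilSpaceOrEnd_alt
  cases h : PySem.List.pyGet? str.toList 0 with
  | none => rfl
  | some c0 =>
    by_cases hg : pvIsNumericChar c0 = true
    · have hfind : PySem.Str.find str " " = PySem.Chars.find str.toList [' '] := by
        simp [PySem.Str.find_eq]
      simp only [hg, not_true_eq_false, if_false]
      rw [pvLoopA_eq_takeWhile, hfind]
      rw [← pvPrefix_eq_takeWhile str.toList]
    · simp [hg]
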